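-- pv_equiv track=rewrite | github.com/ShinnieStar/Flipkart_label_Croping_tool | Shinnie_Star_Label_Cropper_Flipkart.py | build_flipkart_summary_from_meta
-- ===== SOURCE A (Python) =====
-- def build_flipkart_summary_from_meta(meta_skus):
--     counts = {}
--     for sku in meta_skus:
--         counts[sku] = counts.get(sku, 0) + 1
--     rows = [["Sr. No","SKU","Qty"]]
--     sr = 1
--     for sku in sorted(counts.keys(), key=lambda s: (s.startswith("UNKNOWN_"), s)):
--         rows.append([str(sr), sku, str(counts[sku])])
--         sr += 1
--     return rows
-- ===== SOURCE B (Python) =====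
-- from itertools import groupby
--
-- def build_flipkart_summary_from_meta(meta_skus):
--     ordered = sorted(meta_skus, key=lambda s: (s.startswith("UNKNOWN_"), s))
--     rows = [["Sr. No", "SKU", "Qty"]]
--     for sr, (sku, grp) in enumerate(groupby(ordered), 1):
--         rows.append([str(sr), sku, str(sum(1 for _ in grp))])
--     return rows
-- ===== Notes on version B (the rewrite author's own statement) =====
-- stated objective: alternative
-- what changed: B sorts the whole input once by the (startswith-UNKNOWN_, sku) key and groups adjacent equal runs to get each count, instead of A's dict accumulation followed by sorting the distinct keys.
import Mathlib
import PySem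

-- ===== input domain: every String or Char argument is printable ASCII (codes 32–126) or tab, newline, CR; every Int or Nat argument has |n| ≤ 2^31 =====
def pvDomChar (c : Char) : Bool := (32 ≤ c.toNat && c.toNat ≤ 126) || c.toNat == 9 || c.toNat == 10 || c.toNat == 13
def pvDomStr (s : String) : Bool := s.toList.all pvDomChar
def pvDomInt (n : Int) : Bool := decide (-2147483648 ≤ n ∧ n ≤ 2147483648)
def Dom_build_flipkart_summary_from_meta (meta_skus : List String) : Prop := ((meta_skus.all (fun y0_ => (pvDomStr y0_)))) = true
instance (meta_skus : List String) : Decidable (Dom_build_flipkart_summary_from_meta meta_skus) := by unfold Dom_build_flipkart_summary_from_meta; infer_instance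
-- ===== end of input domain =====

-- B replaces A's dict-count-then-sort-keys with sort-the-whole-input-then-group-adjacent-runs (alternative decomposition, same result).

-- ===== PORT A =====
def build_flipkart_summary_from_meta (meta_skus : List String) : List (List String) :=
  let counts := meta_skus.foldl (fun d sku => d.insert sku (d.getD sku 0 + 1)) PySem.Dict.empty
  -- counts[sku]: each iterated sku is a key of counts, so Python's lookup never raises; getD is exact here
  let st := (PySem.List.sorted2 counts.keys
      (fun s => PySem.Str.startswith s "UNKNOWN_") (fun s => s)).foldl
    (fun (st : List (List String) × Int) sku =>
      (st.1 ++ [[PySem.Int.toStr st.2, sku, PySem.Int.toStr (counts.getD sku 0)]], st.2 + 1))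
    ([["Sr. No", "SKU", "Qty"]], 1)
  st.1

-- ===== PORT B =====
-- port of Source B's `_runs`: one run (value, length) per maximal block of equal adjacent elements
def pvRuns : List String → List (String × Nat)
  | [] => []
  | x :: rest =>
    (x, (rest.takeWhile (· == x)).length + 1) :: pvRuns (rest.dropWhile (· == x))
  termination_by l => l.length
  decreasing_by simpa using Nat.lt_succ_of_le (List.length_dropWhile_le (· == x) rest)

def build_flipkart_summary_from_meta_alt (meta_skus : List String) : List (List String) :=
  let ordered := PySem.List.sorted2 meta_skus
      (fun s => PySem.Str.startswith s "UNKNOWN_") (fun s => s)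
  ((pvRuns ordered).zipIdx 1).foldl
    (fun rows p => rows ++ [[PySem.Int.toStr (p.2 : Int), p.1.1, PySem.Int.toStr (p.1.2 : Int)]])
    [["Sr. No", "SKU", "Qty"]]

-- ===== PRECONDITION & SPEC =====
def Spec_build_flipkart_summary_from_meta (meta_skus : List String) (out : List (List String)) : Prop := out = build_flipkart_summary_from_meta_alt meta_skus
instance (meta_skus : List String) (out : List (List String)) : Decidable (Spec_build_flipkart_summary_from_meta meta_skus out) := by unfold Spec_build_flipkart_summary_from_meta; infer_instance

-- ===== CLAIM (what is proved, stated in full; the proofs are below) =====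
def Claim_equal_build_flipkart_summary_from_meta : Prop := ∀ (meta_skus : List String), Dom_build_flipkart_summary_from_meta meta_skus → Spec_build_flipkart_summary_from_meta meta_skus (build_flipkart_summary_from_meta meta_skus)

-- ===== LEMMAS AND PROOFS =====

-- Python's sort key (s.startswith("UNKNOWN_"), s) as a single key into the lexicographic product
def pvKey (s : String) : Bool ×ₗ String := toLex (PySem.Str.startswith s "UNKNOWN_", s)

theorem pvKey_inj : Function.Injective pvKey := by
  intro a b h
  exact congrArg (fun p => (ofLex p).2) h

theorem pv_before_eq (x y : Bool) (s t : String) :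
    (decide (x < y) || (!decide (y < x) && decide (s < t))) = decide (toLex (x, s) < toLex (y, t)) := by
  cases x <;> cases y <;> simp [Prod.Lex.toLex_lt_toLex]

theorem pv_sorted2_eq (xs : List String) :
    PySem.List.sorted2 xs (fun s => PySem.Str.startswith s "UNKNOWN_") (fun s => s)
      = PySem.List.sorted xs pvKey := by
  simp only [PySem.List.sorted2, PySem.List.sorted, if_neg (by decide : ¬ (false = true))]
  congr 1
  funext acc x
  congr 1
  funext a b
  exact pv_before_eq _ _ _ _

theorem pvRuns_fst_mem : ∀ (L : List String) (p : String × Nat), p ∈ pvRuns L → p.1 ∈ L := by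
  intro L
  induction L using pvRuns.induct with
  | case1 => simp [pvRuns]
  | case2 x rest ih =>
    intro p hp
    rw [pvRuns] at hp
    rcases List.mem_cons.mp hp with h | h
    · simp [h]
    · exact List.mem_cons_of_mem _ ((List.dropWhile_sublist _).mem (ih p h))

theorem pv_not_mem_dropWhile : ∀ (rest : List String) (x : String),
    (∀ y ∈ rest, pvKey x ≤ pvKey y) →
    rest.Pairwise (fun a b => pvKey a ≤ pvKey b) →
    x ∉ rest.dropWhile (· == x) := by
  intro rest
  induction rest with
  | nil => simp
  | cons y t ih =>
    intro x hx hp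
    rcases List.pairwise_cons.mp hp with ⟨hy, hp'⟩
    by_cases hyx : (y == x) = true
    · rw [List.dropWhile_cons, if_pos hyx]
      exact ih x (fun z hz => hx z (List.mem_cons_of_mem _ hz)) hp'
    · rw [List.dropWhile_cons, if_neg hyx]
      intro hmem
      rcases List.mem_cons.mp hmem with h | h
      · exact hyx (by simp [h])
      · have h1 : pvKey y ≤ pvKey x := hy x h
        have h2 : pvKey x ≤ pvKey y := hx y (List.mem_cons_self)
        exact hyx (by simp [pvKey_inj (le_antisymm h1 h2)])

theorem pvRuns_spec : ∀ (L : List String),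
    L.Pairwise (fun a b => pvKey a ≤ pvKey b) →
    (∀ p ∈ pvRuns L, (p.2 : Int) = (L.count p.1 : Int)) ∧
    ((pvRuns L).map Prod.fst).Pairwise (fun a b => pvKey a < pvKey b) ∧
    (∀ v, v ∈ (pvRuns L).map Prod.fst ↔ v ∈ L) := by
  intro L
  induction L using pvRuns.induct with
  | case1 => simp [pvRuns]
  | case2 x rest ih =>
    intro hp
    rcases List.pairwise_cons.mp hp with ⟨hx, hp'⟩
    have hsub : (rest.dropWhile (· == x)).Sublist rest := List.dropWhile_sublist _
    have hp'' : (rest.dropWhile (· == x)).Pairwise (fun a b => pvKey a ≤ pvKey b) :=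
      hp'.sublist hsub
    rcases ih hp'' with ⟨ihc, ihp, ihm⟩
    have hxd : x ∉ rest.dropWhile (· == x) := pv_not_mem_dropWhile rest x hx hp'
    have hgrp : ∀ b ∈ rest.takeWhile (· == x), b = x := by
      intro b hb
      simpa using List.mem_takeWhile_imp hb
    have hdecomp : rest = rest.takeWhile (· == x) ++ rest.dropWhile (· == x) :=
      (List.takeWhile_append_dropWhile).symm
    have hfst : ∀ p ∈ pvRuns (rest.dropWhile (· == x)), p.1 ∈ rest.dropWhile (· == x) :=
      fun p hp => pvRuns_fst_mem _ p hp
    refine ⟨?_, ?_, ?_⟩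
    · intro p hp'''
      rw [pvRuns] at hp'''
      have hgz0 : List.count x (List.dropWhile (· == x) rest) = 0 :=
        List.count_eq_zero.mpr hxd
      rcases List.mem_cons.mp hp''' with h | h
      · subst h
        have hc : List.count x (x :: rest) = (List.takeWhile (· == x) rest).length + 1 := by
          rw [List.count_cons_self]
          conv_lhs => rw [hdecomp]
          rw [List.count_append, List.count_eq_length.mpr (fun b hb => (hgrp b hb).symm), hgz0]
        rw [hc]
      · have hv : p.1 ∈ rest.dropWhile (· == x) := hfst p h
        have hvx : p.1 ≠ x := fun e => hxd (e ▸ hv)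
        have hgz : List.count p.1 (List.takeWhile (· == x) rest) = 0 :=
          List.count_eq_zero.mpr (fun hmem => hvx (hgrp _ hmem))
        have hc : List.count p.1 (x :: rest) = List.count p.1 (List.dropWhile (· == x) rest) := by
          rw [List.count_cons_of_ne (Ne.symm hvx)]
          conv_lhs => rw [hdecomp]
          rw [List.count_append, hgz, Nat.zero_add]
        rw [ihc p h, hc]
    · rw [pvRuns]
      simp only [List.map_cons]
      refine List.pairwise_cons.mpr ⟨?_, ihp⟩
      intro v hv
      rcases List.mem_map.mp hv with ⟨p, hpmem, rfl⟩
      have hvd : p.1 ∈ rest.dropWhile (· == x) := hfst p hpmem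
      have hle : pvKey x ≤ pvKey p.1 := hx p.1 (hsub.mem hvd)
      have hne : pvKey x ≠ pvKey p.1 := fun e => hxd ((pvKey_inj e) ▸ hvd)
      exact lt_of_le_of_ne hle hne
    · intro v
      rw [pvRuns]
      simp only [List.map_cons, List.mem_cons]
      constructor
      · rintro (rfl | h)
        · exact Or.inl rfl
        · exact Or.inr (hsub.mem ((ihm v).mp h))
      · rintro (rfl | h)
        · exact Or.inl rfl
        · rw [hdecomp, List.mem_append] at h
          rcases h with h | h
          · exact Or.inl (hgrp v h)
          · exact Or.inr ((ihm v).mpr h)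

theorem pv_fold_eq (g : String → String) : ∀ (R : List (String × Nat)) (acc : List (List String)) (k : Nat),
    (∀ p ∈ R, g p.1 = PySem.Int.toStr (p.2 : Int)) →
    ((R.map Prod.fst).foldl (fun (st : List (List String) × Int) sku =>
        (st.1 ++ [[PySem.Int.toStr st.2, sku, g sku]], st.2 + 1)) (acc, (k : Int))).1
      = (R.zipIdx k).foldl
          (fun rows p => rows ++ [[PySem.Int.toStr (p.2 : Int), p.1.1, PySem.Int.toStr (p.1.2 : Int)]]) acc := by
  intro R
  induction R with
  | nil => intro acc k _; simp
  | cons p R ih =>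
    intro acc k hg
    simp only [List.map_cons, List.foldl_cons, List.zipIdx_cons]
    rw [hg p List.mem_cons_self]
    have hk : ((k : Int) + 1) = ((k + 1 : Nat) : Int) := by push_cast; ring
    rw [hk, ih _ (k + 1) (fun q hq => hg q (List.mem_cons_of_mem _ hq))]

-- ===== VERDICT (by name: the statement is the Claim_ definition above) =====
theorem build_flipkart_summary_from_meta_spec : Claim_equal_build_flipkart_summary_from_meta := by
  intro ms _
  unfold Spec_build_flipkart_summary_from_meta
  simp only [build_flipkart_summary_from_meta, build_flipkart_summary_from_meta_alt]
  rw [PySem.Dict.foldl_insert_getD_add_one_eq_counter, PySem.Dict.keys_counter,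
      pv_sorted2_eq, pv_sorted2_eq]
  set L := PySem.List.sorted ms pvKey with hL
  have hperm : L.Perm ms := PySem.List.sorted_perm ms pvKey false
  have hpw : L.Pairwise (fun a b => pvKey a ≤ pvKey b) := PySem.List.sorted_pairwise ms pvKey
  rcases pvRuns_spec L hpw with ⟨hc, hlt, hm⟩
  -- the sorted distinct keys are exactly the run heads
  have hnodup : ((pvRuns L).map Prod.fst).Nodup :=
    hlt.imp (fun {a b} h e => absurd (e ▸ h) (lt_irrefl _))
  have hpermK : ((pvRuns L).map Prod.fst).Perm (PySem.Set.ofList ms) := by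
    rw [List.perm_ext_iff_of_nodup hnodup (PySem.Set.nodup_ofList ms)]
    intro v
    rw [hm v, PySem.Set.mem_ofList, hperm.mem_iff]
  have hK : PySem.List.sorted (PySem.Set.ofList ms) pvKey = (pvRuns L).map Prod.fst :=
    PySem.List.sorted_eq_of_perm_of_pairwise_lt _ _ pvKey hpermK hlt
  rw [hK]
  exact pv_fold_eq (fun sku => PySem.Int.toStr ((PySem.Dict.counter ms).getD sku 0))
    (pvRuns L) [["Sr. No", "SKU", "Qty"]] 1 (fun p hp => by
      show PySem.Int.toStr ((PySem.Dict.counter ms).getD p.1 0) = PySem.Int.toStr (p.2 : Int)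
      rw [PySem.Dict.getD_counter, ← hperm.count_eq p.1, ← hc p hp])
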